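-- pv_equiv track=rewrite | github.com/AlemKuznetsov/trust-the-route | generate_polyline.py | encode_value
-- ===== SOURCE A (Python) =====
-- def encode_value(value):
--     """Кодирует одно значение (широта или долгота)"""
--     value = value << 1 if value >= 0 else (~value << 1)
--     encoded = []
--     while value >= 0x20:
--         encoded.append(chr((0x20 | (value & 0x1F)) + 63))
--         value >>= 5
--     encoded.append(chr(value + 63))
--     return ''.join(encoded)
-- ===== SOURCE B (Python) =====
-- def encode_value(value):
--     """B: render the zigzagged value as a binary numeral string, left-pad it to a
--     multiple of 5, cut it into 5-bit groups MSB-first, then parse the groups and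
--     emit them as characters in reversed (LSB-first) order."""
--     v = (value << 1) if value >= 0 else ((~value) << 1)
--     bits = format(v, 'b')
--     bits = '0' * ((-len(bits)) % 5) + bits
--     groups = []
--     while bits:
--         groups.append(bits[:5])
--         bits = bits[5:]
--     tail = [chr(int(g, 2) + 95) for g in groups[1:]]
--     return ''.join(reversed(tail)) + chr(int(groups[0], 2) + 63)
-- ===== Notes on version B (the rewrite author's own statement) =====
-- stated objective: alternative
-- what changed: B replaces A's mask-and-shift emission loop by a binary-numeral-string pipeline: it formats the zigzagged value in base 2, left-pads the string to a multiple of 5, cuts it into 5-bit groups MSB-first, parses each group back to an int, and emits the characters in reversed (LSB-first) order.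
import Mathlib
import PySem

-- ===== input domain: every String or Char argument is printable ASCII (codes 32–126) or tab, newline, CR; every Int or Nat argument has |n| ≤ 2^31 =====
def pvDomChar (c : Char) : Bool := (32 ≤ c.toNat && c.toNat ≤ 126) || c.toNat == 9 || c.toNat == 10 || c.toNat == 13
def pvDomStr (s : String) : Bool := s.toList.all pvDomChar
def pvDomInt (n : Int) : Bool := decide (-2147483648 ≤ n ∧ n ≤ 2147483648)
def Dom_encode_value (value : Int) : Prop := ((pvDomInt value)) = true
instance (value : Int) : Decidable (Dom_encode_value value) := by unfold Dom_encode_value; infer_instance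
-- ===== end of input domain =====

-- B replaces A's mask-and-shift emission loop by a binary-numeral-string pipeline:
-- format the zigzagged value in base 2, left-pad to a multiple of 5, cut into 5-bit
-- groups MSB-first, parse the groups and emit them in reversed (LSB-first) order.
-- Objective: alternative decomposition, same cost.

-- ===== PORT A =====
-- A's while loop; after the sign transform the value is nonnegative, so it is carried
-- as a Nat (exact for Python's >=, |, & and >> on nonnegative ints)
def encodeLoopA (value : Nat) (encoded : List Char) : List Char :=
  if 0x20 ≤ value then
    encodeLoopA (value >>> 5) (encoded ++ [Char.ofNat ((0x20 ||| (value &&& 0x1F)) + 63)])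
  else
    encoded ++ [Char.ofNat (value + 63)]
  termination_by value
  decreasing_by
    have := Nat.shiftRight_eq_div_pow value 5
    omega

def encode_value (value : Int) : String :=
  -- ~value = -value - 1 on Python ints; exact
  let value := if value ≥ 0 then value <<< 1 else (~~~value) <<< 1
  String.mk (encodeLoopA value.toNat [])

-- ===== PORT B =====
-- port of format(v, 'b'): MSB-first binary numeral, '0' for 0 (exact for v ≥ 0)
def binBits (v : Nat) : List Char :=
  if v < 2 then [if v = 1 then '1' else '0']
  else binBits (v / 2) ++ [if v % 2 = 1 then '1' else '0']
  termination_by v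
  decreasing_by omega

-- port of Source B's chunking while-loop (append bits[:5]; bits = bits[5:])
def chunk5 (bits : List Char) : List (List Char) :=
  if bits = [] then [] else bits.take 5 :: chunk5 (bits.drop 5)
  termination_by bits.length
  decreasing_by
    rename_i h
    have : bits.length ≠ 0 := fun hl => h (List.eq_nil_of_length_eq_zero hl)
    simp [List.length_drop]; omega

-- port of int(g, 2): exact on the all-'0'/'1' groups this encoder produces
def parse2 (g : List Char) : Nat :=
  g.foldl (fun a c => 2 * a + (if c = '1' then 1 else 0)) 0

def encode_value_alt (value : Int) : String :=
  let v := (if value ≥ 0 then value <<< 1 else (~~~value) <<< 1).toNat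
  let bits0 := binBits v
  -- '0' * ((-len(bits)) % 5) + bits   (Python's (-n) % 5 = (5 - n % 5) % 5)
  let bits := List.replicate ((5 - bits0.length % 5) % 5) '0' ++ bits0
  let gs := chunk5 bits
  let tail := (gs.drop 1).map (fun g => Char.ofNat (parse2 g + 95))      -- groups[1:]
  -- ''.join(reversed(tail)) + chr(int(groups[0], 2) + 63); bits is never empty,
  -- so groups[0] exists (headD's default is unreachable)
  String.mk (tail.reverse ++ [Char.ofNat (parse2 (gs.headD []) + 63)])

-- ===== PRECONDITION & SPEC =====
def Spec_encode_value (value : Int) (out : String) : Prop := out = encode_value_alt value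
instance (value : Int) (out : String) : Decidable (Spec_encode_value value out) := by unfold Spec_encode_value; infer_instance

-- ===== CLAIM (what is proved, stated in full; the proofs are below) =====
def Claim_equal_encode_value : Prop := ∀ (value : Int), Dom_encode_value value → Spec_encode_value value (encode_value value)

-- ===== LEMMAS AND PROOFS =====

-- the base-32 digits of v, LSB first (proof-side reference list)
def chunksLSB (v : Nat) : List Nat :=
  if v / 32 = 0 then [v % 32] else (v % 32) :: chunksLSB (v / 32)
  termination_by v
  decreasing_by omega

def bitc (n : Nat) : Char := if n % 2 = 1 then '1' else '0'

-- the exactly-5-character binary rendering of a digit d < 32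
def fiveBits (d : Nat) : List Char := [bitc (d / 16), bitc (d / 8), bitc (d / 4), bitc (d / 2), bitc d]

lemma or32_eq (d : Nat) (h : d < 32) : 32 ||| d = 32 + d := by
  interval_cases d <;> decide

lemma chunksLSB_ne_nil (v : Nat) : chunksLSB v ≠ [] := by
  unfold chunksLSB; split <;> simp

lemma chunksLSB_lt (v : Nat) : ∀ d ∈ chunksLSB v, d < 32 := by
  induction v using Nat.strong_induction_on with
  | _ v ih =>
    unfold chunksLSB
    split
    · intro d hd; simp at hd; omega
    · intro d hd
      rcases List.mem_cons.mp hd with h | h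
      · omega
      · exact ih (v / 32) (by omega) d h

-- A's loop equals the char rendering of the LSB-first digit list
lemma loopA_eq_chunks (v : Nat) (acc : List Char) :
    encodeLoopA v acc =
      acc ++ ((chunksLSB v).dropLast.map (fun d => Char.ofNat (d + 95)) ++
        [Char.ofNat ((chunksLSB v).getLastD 0 + 63)]) := by
  induction v using Nat.strong_induction_on generalizing acc with
  | _ v ih =>
    rw [encodeLoopA, chunksLSB]
    by_cases h : 0x20 ≤ v
    · have hq : ¬ v / 32 = 0 := by omega
      have hlt : v / 32 < v := by omega
      simp only [if_pos h, if_neg hq]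
      have hshift : v >>> 5 = v / 32 := Nat.shiftRight_eq_div_pow v 5
      rw [hshift, ih (v / 32) hlt]
      have hand : v &&& 0x1F = v % 32 := Nat.and_two_pow_sub_one_eq_mod v 5
      have hor : 0x20 ||| (v % 32) = 32 + v % 32 := or32_eq _ (Nat.mod_lt v (by omega))
      rcases hne : chunksLSB (v / 32) with _ | ⟨b, t⟩
      · exact absurd hne (chunksLSB_ne_nil _)
      · simp [hand, hor, Nat.add_comm 32 (v % 32)]
    · have hq : v / 32 = 0 := by omega
      have hm : v % 32 = v := Nat.mod_eq_of_lt (by omega)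
      have h32 : v < 32 := by omega
      simp [if_neg h, hm, h32]

lemma binBits_div2 (v : Nat) (h : 2 ≤ v) :
    binBits v = binBits (v / 2) ++ [bitc v] := by
  rw [binBits, if_neg (by omega)]; rfl

lemma bitc_congr (a b : Nat) (h : a % 2 = b % 2) : bitc a = bitc b := by
  unfold bitc; rw [h]

-- unrolling binBits five times: the last 5 characters are the bits of v % 32
lemma binBits_step (v : Nat) (h : 32 ≤ v) :
    binBits v = binBits (v / 32) ++ fiveBits (v % 32) := by
  rw [binBits_div2 v (by omega), binBits_div2 (v / 2) (by omega),
      binBits_div2 (v / 2 / 2) (by omega), binBits_div2 (v / 2 / 2 / 2) (by omega),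
      binBits_div2 (v / 2 / 2 / 2 / 2) (by omega)]
  have e2 : v / 2 / 2 = v / 4 := by omega
  have e3 : v / 4 / 2 = v / 8 := by omega
  have e4 : v / 8 / 2 = v / 16 := by omega
  have e5 : v / 16 / 2 = v / 32 := by omega
  rw [e2, e3, e4, e5]
  simp only [fiveBits, List.append_assoc]
  congr 1
  simp only [List.cons_append, List.nil_append]
  rw [bitc_congr (v / 16) (v % 32 / 16) (by omega),
      bitc_congr (v / 8) (v % 32 / 8) (by omega),
      bitc_congr (v / 4) (v % 32 / 4) (by omega),
      bitc_congr (v / 2) (v % 32 / 2) (by omega),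
      bitc_congr v (v % 32) (by omega)]

def paddedBits (v : Nat) : List Char :=
  List.replicate ((5 - (binBits v).length % 5) % 5) '0' ++ binBits v

lemma paddedBits_len (v : Nat) : (paddedBits v).length % 5 = 0 := by
  unfold paddedBits
  rw [List.length_append, List.length_replicate]
  omega

lemma paddedBits_step (v : Nat) (h : 32 ≤ v) :
    paddedBits v = paddedBits (v / 32) ++ fiveBits (v % 32) := by
  unfold paddedBits
  rw [binBits_step v h]
  have hlen : (binBits (v / 32) ++ fiveBits (v % 32)).length = (binBits (v / 32)).length + 5 := by
    simp [fiveBits]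
  rw [hlen, List.append_assoc]
  congr 2
  omega

lemma chunk5_snoc (X : List Char) (hX : X.length % 5 = 0) (Y : List Char) (hY : Y.length = 5) :
    chunk5 (X ++ Y) = chunk5 X ++ [Y] := by
  suffices h : ∀ n (X : List Char), X.length = n → X.length % 5 = 0 →
      chunk5 (X ++ Y) = chunk5 X ++ [Y] from h X.length X rfl hX
  intro n
  induction n using Nat.strong_induction_on with
  | _ n ih =>
    intro X hlen hmod
    rcases eq_or_ne X [] with rfl | hne
    · have hYne : Y ≠ [] := by intro h; rw [h] at hY; simp at hY
      rw [List.nil_append, chunk5, if_neg hYne,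
          List.take_of_length_le (by omega), List.drop_eq_nil_of_le (by omega)]
      rw [chunk5]
      simp
    · have hX5 : 5 ≤ X.length := by
        have : X.length ≠ 0 := fun h => hne (List.eq_nil_of_length_eq_zero h)
        omega
      rw [chunk5, if_neg (by simp [hne]),
          List.take_append_of_le_length hX5, List.drop_append_of_le_length hX5]
      rw [ih (X.length - 5) (by omega) (X.drop 5) (by simp) (by simp; omega)]
      conv_rhs => rw [chunk5, if_neg hne]
      simp

lemma chunk5_padded (v : Nat) :
    chunk5 (paddedBits v) = ((chunksLSB v).reverse).map fiveBits := by
  induction v using Nat.strong_induction_on with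
  | _ v ih =>
    by_cases h : 32 ≤ v
    · rw [paddedBits_step v h,
          chunk5_snoc _ (paddedBits_len (v / 32)) _ (by simp [fiveBits]),
          ih (v / 32) (by omega),
          show chunksLSB v = (v % 32) :: chunksLSB (v / 32) from by
            rw [chunksLSB, if_neg (by omega)]]
      simp
    · have h32 : v < 32 := by omega
      rw [show chunksLSB v = [v] from by rw [chunksLSB, if_pos (by omega), Nat.mod_eq_of_lt h32]]
      clear ih h
      interval_cases v <;> simp [paddedBits, binBits, chunk5, fiveBits, bitc]

lemma bit_val (n : Nat) : (if bitc n = '1' then (1 : Nat) else 0) = n % 2 := by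
  unfold bitc
  rcases Nat.mod_two_eq_zero_or_one n with h | h <;> simp [h]

lemma parse2_fiveBits (d : Nat) (h : d < 32) : parse2 (fiveBits d) = d := by
  simp only [parse2, fiveBits, List.foldl, bit_val]
  omega

-- ===== VERDICT (by name: the statement is the Claim_ definition above) =====
theorem encode_value_spec : Claim_equal_encode_value := by
  intro value _
  unfold Spec_encode_value encode_value encode_value_alt
  set v := (if value ≥ 0 then value <<< 1 else (~~~value) <<< 1).toNat with hv
  show String.mk (encodeLoopA v []) = _
  rw [loopA_eq_chunks]
  have hch : chunk5 (List.replicate ((5 - (binBits v).length % 5) % 5) '0' ++ binBits v)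
      = ((chunksLSB v).reverse).map fiveBits := chunk5_padded v
  simp only []
  rw [hch]
  rcases hL : chunksLSB v with _ | ⟨d, t⟩
  · exact absurd hL (chunksLSB_ne_nil v)
  · have hlt : ∀ x ∈ d :: t, x < 32 := by rw [← hL]; exact chunksLSB_lt v
    rcases hrev : (d :: t).reverse with _ | ⟨a, r⟩
    · simp at hrev
    · have hdt : d :: t = r.reverse ++ [a] := by
        have := congrArg List.reverse hrev
        simpa using this
      have hdl : (d :: t).dropLast = r.reverse := by rw [hdt]; simp
      have hgl : (d :: t).getLastD 0 = a := by rw [hdt]; simp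
      have ha : a < 32 := hlt a (by rw [hdt]; simp)
      have hr : ∀ x ∈ r, x < 32 := fun x hx => hlt x (by rw [hdt]; simp [hx])
      rw [hdl, hgl]
      simp only [List.map_cons, List.headD_cons, List.drop_succ_cons, List.drop_zero,
        List.map_map]
      rw [parse2_fiveBits a ha]
      congr 1
      simp only [List.nil_append]
      congr 1
      rw [← List.map_reverse]
      exact (List.map_congr_left (fun x hx => by
        simp [Function.comp, parse2_fiveBits x (hr x (List.mem_reverse.mp hx))])).symm
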